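-- pv_equiv track=rewrite | github.com/sorin-andrei/ColumnarTranspositionCypher | columnar_transposition_cypher.py | alphabeticalOrder
-- ===== SOURCE A (Python) =====
-- def alphabeticalOrder(string):
--     mappings = list()
--     i = 0
--     sortedString = sorted(string)
--     for character in sortedString:
--         mappings.append([i,character])
--         i+=1
--
--     #Return sorted word back to original word, keeping the same indices
--     mappingsOrdered = list()
--     for character in string:
--         for element in mappings:
--             if element[1] == character:
--                 mappingsOrdered.append(element)
--
--     result = list()
--     for element in mappingsOrdered:
--         result.append(element[0])
--
--     return result
-- ===== SOURCE B (Python) =====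
-- def alphabeticalOrder(string):
--     result = []
--     for ch in string:
--         lo = 0
--         n = 0
--         for other in string:
--             if other < ch:
--                 lo += 1
--             elif other == ch:
--                 n += 1
--         result.extend(range(lo, lo + n))
--     return result
-- ===== Notes on version B (the rewrite author's own statement) =====
-- stated objective: simpler
-- what changed: B drops A's sort and the three bookkeeping lists entirely: for each character it counts characters strictly smaller (lo) and equal (n) in one inner pass and emits range(lo, lo+n), since in the sorted string the positions holding ch are exactly that contiguous block.
import Mathlib
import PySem

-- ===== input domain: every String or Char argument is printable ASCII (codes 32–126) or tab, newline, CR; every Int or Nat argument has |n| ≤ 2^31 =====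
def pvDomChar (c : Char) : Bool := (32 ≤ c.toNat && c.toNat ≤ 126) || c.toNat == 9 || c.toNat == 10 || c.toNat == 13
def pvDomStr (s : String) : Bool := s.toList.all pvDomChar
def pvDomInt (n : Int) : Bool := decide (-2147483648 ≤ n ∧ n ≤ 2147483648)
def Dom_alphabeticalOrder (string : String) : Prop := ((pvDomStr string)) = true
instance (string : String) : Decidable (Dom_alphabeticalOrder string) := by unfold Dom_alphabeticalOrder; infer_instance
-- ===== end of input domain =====

-- B replaces A's sort + three bookkeeping lists by, per character, one counting pass
-- (strictly-smaller and equal counts) emitting the contiguous block of sorted positions. Objective: simpler.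

-- ===== PORT A =====
def alphabeticalOrder (string : String) : List Int :=
  -- mappings = [[i, c] for i, c in enumerate(sorted(string))], built with the explicit counter i
  let sortedString := PySem.List.sorted string.toList (fun c => c) false
  let st := sortedString.foldl
      (fun (acc : List (Int × Char) × Int) character =>
        (acc.1 ++ [(acc.2, character)], acc.2 + 1)) ([], 0)
  let mappings := st.1
  -- mappingsOrdered: for each character of string, append every matching element of mappings
  let mappingsOrdered := string.toList.foldl
      (fun acc character =>
        mappings.foldl
          (fun acc2 element => if element.2 == character then acc2 ++ [element] else acc2) acc) []
  -- result: first components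
  mappingsOrdered.foldl (fun acc element => acc ++ [element.1]) []

-- ===== PORT B =====
def alphabeticalOrder_alt (string : String) : List Int :=
  string.toList.foldl
    (fun result ch =>
      let p := string.toList.foldl
        (fun (p : Int × Int) other =>
          if other < ch then (p.1 + 1, p.2)
          else if other == ch then (p.1, p.2 + 1)
          else p) (0, 0)
      result ++ PySem.List.pyRange p.1 (p.1 + p.2) 1) []

-- ===== PRECONDITION & SPEC =====
def Spec_alphabeticalOrder (string : String) (out : List Int) : Prop := out = alphabeticalOrder_alt string
instance (string : String) (out : List Int) : Decidable (Spec_alphabeticalOrder string out) := by unfold Spec_alphabeticalOrder; infer_instance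

-- ===== CLAIM (what is proved, stated in full; the proofs are below) =====
def Claim_equal_alphabeticalOrder : Prop := ∀ (string : String), Dom_alphabeticalOrder string → Spec_alphabeticalOrder string (alphabeticalOrder string)

-- ===== LEMMAS AND PROOFS =====

lemma pv_mappings_fold (t : List Char) (acc : List (Int × Char)) (i : Int) :
    t.foldl (fun (a : List (Int × Char) × Int) c => (a.1 ++ [(a.2, c)], a.2 + 1)) (acc, i)
      = (acc ++ PySem.List.enumerate t i, i + t.length) := by
  induction t generalizing acc i with
  | nil => simp [PySem.List.enumerate_nil]
  | cons c t ih =>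
      simp only [List.foldl_cons, ih, PySem.List.enumerate_cons, List.length_cons,
        List.append_assoc, List.singleton_append, Prod.mk.injEq, true_and]
      push_cast; ring

-- B's inner counting fold computes (countP (< ch), count ch)
lemma pv_count_fold (l : List Char) (ch : Char) (a b : Int) :
    l.foldl (fun (p : Int × Int) other =>
        if other < ch then (p.1 + 1, p.2)
        else if other == ch then (p.1, p.2 + 1)
        else p) (a, b)
      = (a + l.countP (fun x => decide (x < ch)), b + l.count ch) := by
  induction l generalizing a b with
  | nil => simp
  | cons x l ih =>
      simp only [List.foldl_cons]
      by_cases hx : x < ch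
      · rw [if_pos hx, ih, List.countP_cons_of_pos (by simpa using hx),
          List.count_cons_of_ne (by rintro rfl; exact lt_irrefl _ hx)]
        simp only [Prod.mk.injEq]
        constructor
        · push_cast; ring
        · trivial
      · by_cases he : x = ch
        · subst he
          rw [if_neg hx, if_pos (by simp), ih,
            List.countP_cons_of_neg (by simpa using hx), List.count_cons_self]
          simp only [Prod.mk.injEq]
          constructor
          · trivial
          · push_cast; ring
        · rw [if_neg hx, if_neg (by simpa using he), ih,
            List.countP_cons_of_neg (by simpa using hx),
            List.count_cons_of_ne (by rintro rfl; exact he rfl)]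

-- core: in a sorted list, the indices carrying value c form the contiguous block
-- [s + countP (< c), s + countP (< c) + count c)
lemma pv_sorted_block (t : List Char) (ht : t.Pairwise (· ≤ ·)) (c : Char) (s : Int) :
    ((PySem.List.enumerate t s).filter (fun e => e.2 == c)).map (·.1)
      = PySem.List.pyRange (s + t.countP (fun x => decide (x < c)))
          (s + t.countP (fun x => decide (x < c)) + t.count c) 1 := by
  induction t generalizing s with
  | nil => simp [PySem.List.enumerate_nil, PySem.List.pyRange_one_eq_nil]
  | cons a t ih =>
      have hpw := List.pairwise_cons.mp ht
      have ha : ∀ x ∈ t, a ≤ x := hpw.1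
      have iht := ih hpw.2
      rw [PySem.List.enumerate_cons]
      rcases lt_trichotomy a c with hlt | heq | hgt
      · -- a < c: head filtered out, countP shifts by one
        have hne : (a == c) = false := by
          simp only [beq_eq_false_iff_ne]; rintro rfl; exact lt_irrefl _ hlt
        rw [List.filter_cons_of_neg (by simp [hne]), iht (s + 1),
          List.countP_cons_of_pos (by simpa using hlt),
          List.count_cons_of_ne (by rintro rfl; exact lt_irrefl _ hlt)]
        congr 1 <;> push_cast <;> ring
      · -- a = c: head kept; everything in t is ≥ c, so countP t (< c) = 0
        subst heq
        have hz : t.countP (fun x => decide (x < a)) = 0 := by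
          rw [List.countP_eq_zero]
          intro x hx
          simpa using not_lt.mpr (ha x hx)
        rw [List.filter_cons_of_pos (by simp), List.map_cons, iht (s + 1),
          List.countP_cons_of_neg (by simp), List.count_cons_self, hz]
        simp only [Nat.cast_zero, add_zero, Nat.cast_add, Nat.cast_one]
        conv_rhs => rw [PySem.List.pyRange_one_cons (by omega)]
        congr 2
        ring
      · -- c < a: head filtered out; nothing here or later equals c
        have hne : (a == c) = false := by
          simp only [beq_eq_false_iff_ne]; rintro rfl; exact lt_irrefl _ hgt
        have hcnt : t.count c = 0 := by
          rw [List.count_eq_zero]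
          intro hc
          exact absurd (lt_of_lt_of_le hgt (ha c hc)) (lt_irrefl _)
        rw [List.filter_cons_of_neg (by simp [hne]), iht (s + 1),
          List.countP_cons_of_neg (by simpa using not_lt.mpr (le_of_lt hgt)),
          List.count_cons_of_ne (by rintro rfl; exact lt_irrefl _ hgt), hcnt]
        simp only [Nat.cast_zero, add_zero]
        rw [PySem.List.pyRange_one_eq_nil (by omega), PySem.List.pyRange_one_eq_nil (by omega)]

-- ===== VERDICT (by name: the statement is the Claim_ definition above) =====
theorem alphabeticalOrder_spec : Claim_equal_alphabeticalOrder := by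
  intro string _
  unfold Spec_alphabeticalOrder alphabeticalOrder alphabeticalOrder_alt
  simp only [pv_mappings_fold, List.nil_append, pv_count_fold,
    PySem.List.foldl_append_if, PySem.List.foldl_append_eq_flatMap]
  have hperm := PySem.List.sorted_perm string.toList (fun c => c) false
  have hpw := PySem.List.sorted_pairwise string.toList (fun c => c)
  rw [List.flatMap_assoc]
  congr 1
  funext c
  rw [List.map_id', ← List.map_eq_flatMap, pv_sorted_block _ hpw c 0,
    hperm.countP_eq, hperm.count_eq]
  congr 1 <;> ring
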